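-- pv_equiv track=rewrite | github.com/iamjuandperez/p0 | p0/lexer.py | separador
-- ===== SOURCE A (Python) =====
-- def separador (texto : str ):
--
--
--     parentesis = ['(', ')']
--     for caracter in parentesis:
--         if caracter not in ['(', ')']:
--             texto = texto.replace(caracter, ' ')
--
--
--     texto = texto.replace('(', ' ( ').replace(')', ' ) ')
--     palabras = texto.split()
--
--     return palabras
-- ===== SOURCE B (Python) =====
-- def separador(texto: str):
--     # single-pass tokenizer: same tokens as replace-parens-then-split
--     palabras = []
--     actual = []
--     for ch in texto:
--         if ch == '(' or ch == ')':
--             if actual: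
--                 palabras.append(''.join(actual))
--                 actual = []
--             palabras.append(ch)
--         elif ch.isspace():
--             if actual:
--                 palabras.append(''.join(actual))
--                 actual = []
--         else:
--             actual.append(ch)
--     if actual:
--         palabras.append(''.join(actual))
--     return palabras
-- ===== Notes on version B (the rewrite author's own statement) =====
-- stated objective: alternative
-- what changed: Replaces the replace-parens-with-padded-parens-then-split() pipeline (which builds two intermediate strings) by a single left-to-right pass that emits word and parenthesis tokens directly with a current-word accumulator.
import Mathlib
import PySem

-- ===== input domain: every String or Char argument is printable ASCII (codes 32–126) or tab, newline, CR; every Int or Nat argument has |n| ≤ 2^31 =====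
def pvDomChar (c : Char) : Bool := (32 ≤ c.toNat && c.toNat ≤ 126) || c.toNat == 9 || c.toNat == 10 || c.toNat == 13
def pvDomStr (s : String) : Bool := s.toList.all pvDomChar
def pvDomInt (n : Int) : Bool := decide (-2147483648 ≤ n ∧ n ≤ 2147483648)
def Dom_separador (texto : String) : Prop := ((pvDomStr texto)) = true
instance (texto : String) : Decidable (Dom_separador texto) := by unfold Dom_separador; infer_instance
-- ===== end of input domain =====

-- B is a single-pass tokenizer with a current-word accumulator instead of A's replace-then-split pipeline; return values proved equal.

-- ===== PORT A =====
def separador (texto : String) : List String :=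
  -- the for-loop over parentesis (its branch body never fires), ported literally
  let texto1 := ["(", ")"].foldl
    (fun t caracter => if (["(", ")"].contains caracter) = false
                       then PySem.Str.replace t caracter " " else t) texto
  let texto2 := PySem.Str.replace (PySem.Str.replace texto1 "(" " ( ") ")" " ) "
  PySem.Str.split₀ texto2

-- ===== PORT B =====
def sepStep (st : List String × List Char) (c : Char) : List String × List Char :=
  if c = '(' ∨ c = ')' then
    ((if st.2.isEmpty then st.1 else st.1 ++ [String.mk st.2]) ++ [String.mk [c]], [])
  else if PySem.Chars.isspace c = true then
    (if st.2.isEmpty then st.1 else st.1 ++ [String.mk st.2], [])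
  else (st.1, st.2 ++ [c])

def separador_alt (texto : String) : List String :=
  let fin := texto.toList.foldl sepStep ([], [])
  if fin.2.isEmpty then fin.1 else fin.1 ++ [String.mk fin.2]

-- ===== PRECONDITION & SPEC =====
def Spec_separador (texto : String) (out : List String) : Prop := out = separador_alt texto
instance (texto : String) (out : List String) : Decidable (Spec_separador texto out) := by unfold Spec_separador; infer_instance

-- ===== CLAIM (what is proved, stated in full; the proofs are below) =====
def Claim_equal_separador : Prop := ∀ (texto : String), Dom_separador texto → Spec_separador texto (separador texto)

-- ===== LEMMAS AND PROOFS =====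

-- per-character image of A's two replaces
def imgH (c : Char) : List Char :=
  if c = '(' then [' ', '(', ' '] else if c = ')' then [' ', ')', ' '] else [c]

-- common recursive tokenizer spec on lists of chars
def tok (cur : List Char) : List Char → List (List Char)
  | [] => if cur.isEmpty then [] else [cur]
  | c :: cs =>
    if c = '(' ∨ c = ')' then
      (if cur.isEmpty then [] else [cur]) ++ [c] :: tok [] cs
    else if PySem.Chars.isspace c then
      (if cur.isEmpty then [] else [cur]) ++ tok [] cs
    else tok (cur ++ [c]) cs

theorem replace_go_single (c0 : Char) (new : List Char) :
    ∀ (l : List Char) (fuel : Nat) (acc : List Char), l.length ≤ fuel →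
      PySem.Chars.replace.go [c0] new fuel l acc
        = acc.reverse ++ l.flatMap (fun c => if c = c0 then new else [c]) := by
  intro l
  induction l with
  | nil =>
    intro fuel acc _
    cases fuel <;> simp [PySem.Chars.replace.go]
  | cons c t ih =>
    intro fuel acc h
    cases fuel with
    | zero => simp at h
    | succ f =>
      simp only [PySem.Chars.replace.go]
      by_cases hc : c = c0
      · subst hc
        have hpre : List.isPrefixOf [c] (c :: t) = true := by simp [List.isPrefixOf]
        rw [hpre]
        simp only [List.length_cons] at h
        rw [show List.drop [c].length (c :: t) = t from rfl]
        rw [ih f (new.reverse ++ acc) (by omega)]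
        simp
      · have hpre : List.isPrefixOf [c0] (c :: t) = false := by
          simp [List.isPrefixOf]
          exact fun h' => absurd h'.symm hc
        rw [hpre]
        simp only [List.length_cons] at h
        rw [ih f (c :: acc) (by omega)]
        simp [hc]

theorem replace_single (s : List Char) (c0 : Char) (new : List Char) :
    PySem.Chars.replace s [c0] new
      = s.flatMap (fun c => if c = c0 then new else [c]) := by
  simp only [PySem.Chars.replace, List.isEmpty_cons, Bool.false_eq_true, if_false]
  exact replace_go_single c0 new s (s.length) [] le_rfl

theorem img_eq (s : List Char) :
    PySem.Chars.replace (PySem.Chars.replace s ['('] [' ', '(', ' ']) [')'] [' ', ')', ' ']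
      = s.flatMap imgH := by
  rw [replace_single, replace_single, List.flatMap_assoc]
  apply List.flatMap_congr
  intro c _
  by_cases h1 : c = '(' <;> by_cases h2 : c = ')' <;>
    simp_all [imgH]

-- split₀.go over the image stream computes tok
theorem splitgo_img (cs : List Char) :
    ∀ (cur : List Char) (acc : List (List Char)),
      (∀ c ∈ cur, PySem.Chars.isspace c = false) →
      PySem.Chars.split₀.go (cs.flatMap imgH) cur acc
        = acc.reverse ++ tok cur.reverse cs := by
  induction cs with
  | nil =>
    intro cur acc _
    simp only [List.flatMap_nil, PySem.Chars.split₀.go, tok]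
    by_cases h : cur = []
    · subst h; simp
    · simp [h, List.isEmpty_iff]
  | cons c cs ih =>
    intro cur acc hcur
    by_cases hp : c = '(' ∨ c = ')'
    · have himg : imgH c = [' ', c, ' '] := by
        rcases hp with h | h <;> subst h <;> simp [imgH]
      have hcsp : PySem.Chars.isspace c = false := by
        rcases hp with h | h <;> subst h <;> decide
      have hsp : PySem.Chars.isspace ' ' = true := by decide
      simp only [List.flatMap_cons, himg, List.cons_append, List.nil_append]
      by_cases hc : cur = []
      · subst hc
        simp only [PySem.Chars.split₀.go, hsp, hcsp, List.isEmpty_nil, List.isEmpty_cons,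
          if_true, if_false, Bool.false_eq_true, List.reverse_cons, List.reverse_nil,
          List.nil_append]
        rw [ih [] ([c] :: acc) (by simp)]
        simp [tok, hp]
      · have hce : cur.isEmpty = false := by simp [List.isEmpty_iff, hc]
        simp only [PySem.Chars.split₀.go, hsp, hcsp, hce, List.isEmpty_cons,
          if_true, if_false, Bool.false_eq_true, List.reverse_cons, List.reverse_nil,
          List.nil_append]
        rw [ih [] ([c] :: (cur.reverse :: acc)) (by simp)]
        simp [tok, hp, List.isEmpty_iff, hc]
    · push_neg at hp
      have himg : imgH c = [c] := by simp [imgH, hp.1, hp.2]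
      simp only [List.flatMap_cons, himg, List.cons_append, List.nil_append]
      by_cases hs : PySem.Chars.isspace c = true
      · by_cases hc : cur = []
        · subst hc
          simp only [PySem.Chars.split₀.go, hs, List.isEmpty_nil, if_true]
          rw [ih [] acc (by simp)]
          simp [tok, hp.1, hp.2, hs]
        · have hce : cur.isEmpty = false := by simp [List.isEmpty_iff, hc]
          simp only [PySem.Chars.split₀.go, hs, hce, if_true, if_false, Bool.false_eq_true]
          rw [ih [] (cur.reverse :: acc) (by simp)]
          simp [tok, hp.1, hp.2, hs, List.isEmpty_iff, hc]
      · have hs' : PySem.Chars.isspace c = false := by simpa using hs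
        simp only [PySem.Chars.split₀.go, hs', Bool.false_eq_true, if_false]
        rw [ih (c :: cur) acc (by
          intro x hx
          rcases List.mem_cons.mp hx with h | h
          · subst h; exact hs'
          · exact hcur x h)]
        simp [tok, hp.1, hp.2, hs']

theorem split_tok (cs : List Char) :
    PySem.Chars.split₀ (cs.flatMap imgH) = tok [] cs := by
  have := splitgo_img cs [] [] (by simp)
  simpa [PySem.Chars.split₀] using this

-- B's fold computes tok (mapped to strings)
theorem foldl_sepStep (cs : List Char) :
    ∀ (res : List String) (cur : List Char),
      (let fin := cs.foldl sepStep (res, cur)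
       if fin.2.isEmpty then fin.1 else fin.1 ++ [String.mk fin.2])
        = res ++ (tok cur cs).map String.mk := by
  induction cs with
  | nil =>
    intro res cur
    by_cases h : cur = [] <;> simp [tok, h, List.isEmpty_iff]
  | cons c cs ih =>
    intro res cur
    by_cases hp : c = '(' ∨ c = ')'
    · simp only [List.foldl_cons, sepStep, hp, if_true]
      rw [ih]
      by_cases h : cur = [] <;> simp [tok, hp, h, List.isEmpty_iff]
    · by_cases hs : PySem.Chars.isspace c = true
      · simp only [List.foldl_cons, sepStep, hp, hs, if_true, if_false]
        rw [ih]
        by_cases h : cur = [] <;> simp [tok, hp, hs, h, List.isEmpty_iff]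
      · have hs' : PySem.Chars.isspace c = false := by simpa using hs
        simp only [List.foldl_cons, sepStep, hp, hs', Bool.false_eq_true, if_false]
        rw [ih]
        simp [tok, hp, hs']

theorem map_mk_of_map_toList {xs : List String} {ys : List (List Char)}
    (h : xs.map String.toList = ys) : xs = ys.map String.mk := by
  subst h
  rw [List.map_map]
  exact ((List.map_congr_left fun s _ => String.ofList_toList).trans (List.map_id _)).symm

theorem separador_eq (texto : String) :
    separador texto = (tok [] texto.toList).map String.mk := by
  unfold separador
  have hloop : (["(", ")"].foldl
      (fun t caracter => if (["(", ")"].contains caracter) = false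
                         then PySem.Str.replace t caracter " " else t) texto) = texto := rfl
  rw [hloop]
  apply map_mk_of_map_toList
  rw [PySem.Str.split₀_map_toList, PySem.Str.toList_replace, PySem.Str.toList_replace]
  rw [show (")" : String).toList = [')'] from rfl, show ("(" : String).toList = ['('] from rfl,
      show (" ( " : String).toList = [' ', '(', ' '] from rfl,
      show (" ) " : String).toList = [' ', ')', ' '] from rfl]
  rw [img_eq, split_tok]

theorem separador_alt_eq (texto : String) :
    separador_alt texto = (tok [] texto.toList).map String.mk := by
  unfold separador_alt
  simpa using foldl_sepStep texto.toList [] []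

-- ===== VERDICT (by name: the statement is the Claim_ definition above) =====
theorem separador_spec : Claim_equal_separador := by
  intro texto _
  unfold Spec_separador
  rw [separador_eq, separador_alt_eq]
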